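-- pv_equiv track=rewrite | github.com/cdalaigre/INIT_PROG | TP/tp9/petites_betes.py | dico_par_famille
-- ===== SOURCE A (Python) =====
-- def dico_par_famille(pokedex):
--     """Construit un dictionnaire dont les les clés sont le nom de familles (str)
--     et la valeur associée est l'ensemble (set) des noms des pokemons de cette
--     famille dans le pokedex
--
--     Args:
--         pokedex (list): liste de pokemon, chaque pokemon est modélisé par
--         un couple de str (nom, famille)
--
--     Returns:
--         dict: un dictionnaire dont les clés sont le nom de familles (str) et la valeur associée est
--         l'ensemble (set) des noms des pokemons de cette famille dans le pokedex
--     """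
--     dico_famille = dict()
--
--     for nom,famille in pokedex:
--         if famille in dico_famille.keys():
--             dico_famille[famille].add(nom)
--         else:
--             dico_famille[famille]=set()
--             dico_famille[famille].add(nom)
--
--
--     return dico_famille
-- ===== SOURCE B (Python) =====
-- def dico_par_famille(pokedex):
--     familles = list(dict.fromkeys(famille for _, famille in pokedex))
--     return {f: {nom for nom, famille in pokedex if famille == f} for f in familles}
-- ===== Notes on version B (the rewrite author's own statement) =====
-- stated objective: alternative
-- what changed: Replaces the single-pass dict-of-mutable-sets accumulation by a two-phase grouping: first dedup the family column (dict.fromkeys), then build each family's name set by a comprehension over the whole list.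
import Mathlib
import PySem

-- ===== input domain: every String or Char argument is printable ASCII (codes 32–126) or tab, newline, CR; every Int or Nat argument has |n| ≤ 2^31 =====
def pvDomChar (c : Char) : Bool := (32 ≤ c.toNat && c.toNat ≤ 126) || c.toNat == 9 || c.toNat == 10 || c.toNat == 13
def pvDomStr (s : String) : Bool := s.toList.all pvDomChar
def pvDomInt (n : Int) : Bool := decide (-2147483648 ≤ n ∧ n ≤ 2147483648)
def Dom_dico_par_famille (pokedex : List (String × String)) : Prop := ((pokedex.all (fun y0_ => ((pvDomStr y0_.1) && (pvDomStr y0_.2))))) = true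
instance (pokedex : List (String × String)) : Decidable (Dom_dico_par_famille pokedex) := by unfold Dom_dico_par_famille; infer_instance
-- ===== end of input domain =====

-- B groups in two phases (dedup the family column, then one filtered scan per family) instead of A's single-pass dict-of-sets accumulation; objective: alternative decomposition.


-- ===== PORT A =====
-- one loop iteration: mutate d[famille] (a set) in place, creating it first when absent
def pvStep (d : PySem.Dict String (List String)) (p : String × String) : PySem.Dict String (List String) :=
  if d.contains p.2 then
    d.insert p.2 (PySem.Set.add (d.getD p.2 PySem.Set.empty) p.1)
  else
    let d1 := d.insert p.2 PySem.Set.empty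
    d1.insert p.2 (PySem.Set.add (d1.getD p.2 PySem.Set.empty) p.1)

def dico_par_famille (pokedex : List (String × String)) : List (String × List String) :=
  (pokedex.foldl pvStep PySem.Dict.empty).items

-- ===== PORT B =====
-- {nom for nom, famille in pokedex if famille == f}
def pvNoms (pokedex : List (String × String)) (f : String) : List String :=
  PySem.Set.ofList ((pokedex.filter (fun p => p.2 == f)).map Prod.fst)

def dico_par_famille_alt (pokedex : List (String × String)) : List (String × List String) :=
  (PySem.List.dedup (pokedex.map Prod.snd)).map (fun f => (f, pvNoms pokedex f))

-- ===== PRECONDITION & SPEC =====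
def Spec_dico_par_famille (pokedex : List (String × String)) (out : List (String × List String)) : Prop := out = dico_par_famille_alt pokedex
instance (pokedex : List (String × String)) (out : List (String × List String)) : Decidable (Spec_dico_par_famille pokedex out) := by unfold Spec_dico_par_famille; infer_instance

-- ===== CLAIM (what is proved, stated in full; the proofs are below) =====
def Claim_equal_dico_par_famille : Prop := ∀ (pokedex : List (String × String)), Dom_dico_par_famille pokedex → Spec_dico_par_famille pokedex (dico_par_famille pokedex)

-- ===== LEMMAS AND PROOFS =====

theorem pvNoms_append (ps : List (String × String)) (p : String × String) (f : String) :
    pvNoms (ps ++ [p]) f = if p.2 = f then PySem.Set.add (pvNoms ps f) p.1 else pvNoms ps f := by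
  unfold pvNoms
  rw [List.filter_append]
  by_cases h : p.2 = f
  · simp [h, PySem.Set.ofList_append_singleton]
  · simp [h]

theorem pv_main (ps : List (String × String)) :
    (ps.foldl pvStep PySem.Dict.empty).items
      = (PySem.Set.ofList (ps.map Prod.snd)).map (fun f => (f, pvNoms ps f)) := by
  induction ps using List.reverseRecOn with
  | nil => rfl
  | append_singleton ps p ih =>
    rw [List.foldl_append, List.foldl_cons, List.foldl_nil]
    set d := ps.foldl pvStep PySem.Dict.empty with hd
    have hkeys : d.keys = PySem.Set.ofList (ps.map Prod.snd) := by
      show d.items.map Prod.fst = _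
      rw [ih, List.map_map]
      simp [Function.comp_def]
    have hnd : d.keys.Nodup := by rw [hkeys]; exact PySem.Set.nodup_ofList _
    rw [List.map_append, List.map_singleton, PySem.Set.ofList_append_singleton]
    by_cases hc : d.contains p.2
    · -- p.2 already a key
      have hmemk : p.2 ∈ PySem.Set.ofList (ps.map Prod.snd) := by
        rw [← hkeys]; exact (PySem.Dict.contains_iff_mem_keys d p.2).mp hc
      have hadd : PySem.Set.add (PySem.Set.ofList (ps.map Prod.snd)) p.2
          = PySem.Set.ofList (ps.map Prod.snd) := by
        simp [PySem.Set.add, hmemk]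
      unfold pvStep
      rw [if_pos hc]
      have hmemitem : (p.2, pvNoms ps p.2) ∈ d.items := by
        rw [ih]; exact List.mem_map_of_mem hmemk
      have hgetD : d.getD p.2 PySem.Set.empty = pvNoms ps p.2 :=
        PySem.Dict.getD_of_mem_items _ hmemitem hnd _
      rw [PySem.Dict.items_insert_of_contains _ _ hc, ih, hgetD, hadd, List.map_map]
      apply List.map_congr_left
      intro g hg
      by_cases hgf : g = p.2
      · subst hgf
        simp [pvNoms_append]
      · have : (g == p.2) = false := by simp [hgf]
        simp [pvNoms_append, Ne.symm hgf]
        exact hgf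
    · -- new family: appended at the end
      have hnmem : p.2 ∉ PySem.Set.ofList (ps.map Prod.snd) := by
        rw [← hkeys]
        exact fun h => hc ((PySem.Dict.contains_iff_mem_keys d p.2).mpr h)
      have hadd : (PySem.Set.ofList (ps.map Prod.snd)).add p.2
          = PySem.Set.ofList (ps.map Prod.snd) ++ [p.2] := by
        simp [PySem.Set.add, hnmem]
      unfold pvStep
      rw [if_neg hc]
      rw [PySem.Dict.insert_insert_self, PySem.Dict.getD_insert_self]
      have hcontains2 : (PySem.Dict.insert d p.2 (PySem.Set.add PySem.Set.empty p.1)) = d.insert p.2 [p.1] := rfl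
      rw [hcontains2, PySem.Dict.items_insert_of_not_contains _ _ (by simpa using hc), ih, hadd, List.map_append]
      congr 1
      · apply List.map_congr_left
        intro g hg
        have hgf : g ≠ p.2 := fun h => hnmem (h ▸ hg)
        have : (p.2 == g) = false := by simp [Ne.symm hgf]
        simp [pvNoms_append, Ne.symm hgf]
      · have hnmem' : p.2 ∉ ps.map Prod.snd := by
          intro h; exact hnmem (by simpa [pysem] using h)
        have hfilter : ps.filter (fun q => q.2 == p.2) = [] := by
          rw [List.filter_eq_nil_iff]
          intro q hq h
          simp only [beq_iff_eq] at h
          exact hnmem' (h ▸ List.mem_map_of_mem hq)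
        have h1 : pvNoms (ps ++ [p]) p.2 = [p.1] := by
          unfold pvNoms
          rw [List.filter_append, hfilter]
          simp [PySem.Set.ofList, PySem.Set.add]
        simp [h1]


-- ===== VERDICT (by name: the statement is the Claim_ definition above) =====
theorem dico_par_famille_spec : Claim_equal_dico_par_famille := by
  intro ps _
  unfold Spec_dico_par_famille dico_par_famille dico_par_famille_alt
  rw [PySem.List.dedup_eq_ofList]
  exact pv_main ps
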